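-- pv_equiv track=rewrite | github.com/bitazoft/business-chat-assistent | chatbot/agent/customer_service_rag.py | _suggest_response_approach
-- ===== SOURCE A (Python) =====
-- from typing import Dict, List, Any
--
-- def _suggest_response_approach(examples: List[Dict[str, Any]]) -> str:
--     """
--     Suggest the best response approach based on examples
--     """
--     if not examples:
--         return "general_assistance"
--
--     # Count categories to determine approach
--     categories = [ex.get("category", "") for ex in examples]
--
--     if "ORDER" in categories:
--         return "order_assistance"
--     elif "ACCOUNT" in categories:
--         return "account_assistance"
--     elif "PAYMENT" in categories:
--         return "payment_assistance"
--     elif "REFUND" in categories: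
--         return "refund_assistance"
--     elif "DELIVERY" in categories:
--         return "delivery_assistance"
--     else:
--         return "general_customer_service"
-- ===== SOURCE B (Python) =====
-- def _suggest_response_approach(examples):
--     """Single pass tracking the minimum priority index instead of five membership scans."""
--     if not examples:
--         return "general_assistance"
--     prio = {"ORDER": 0, "ACCOUNT": 1, "PAYMENT": 2, "REFUND": 3, "DELIVERY": 4}
--     best = 5
--     for ex in examples:
--         i = prio.get(ex.get("category", ""), 5)
--         if i < best:
--             best = i
--     return {0: "order_assistance", 1: "account_assistance", 2: "payment_assistance",
--             3: "refund_assistance", 4: "delivery_assistance"}.get(best, "general_customer_service")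
-- ===== Notes on version B (the rewrite author's own statement) =====
-- stated objective: alternative
-- what changed: Replaced five sequential membership scans over the category list by a single pass over examples tracking the minimum priority index, mapped to the approach string at the end.
import Mathlib
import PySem

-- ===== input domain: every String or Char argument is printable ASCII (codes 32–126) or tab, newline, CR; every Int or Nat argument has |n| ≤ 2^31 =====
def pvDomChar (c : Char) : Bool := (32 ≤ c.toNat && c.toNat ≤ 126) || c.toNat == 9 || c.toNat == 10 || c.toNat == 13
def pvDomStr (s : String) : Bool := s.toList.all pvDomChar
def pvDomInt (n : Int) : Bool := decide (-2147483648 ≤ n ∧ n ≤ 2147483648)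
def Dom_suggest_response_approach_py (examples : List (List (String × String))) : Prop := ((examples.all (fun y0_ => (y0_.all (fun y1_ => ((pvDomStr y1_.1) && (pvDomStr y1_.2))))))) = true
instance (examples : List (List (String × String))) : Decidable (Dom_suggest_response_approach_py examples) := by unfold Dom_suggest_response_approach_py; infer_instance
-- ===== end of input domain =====

-- B is an alternative single-pass algorithm: one scan of examples tracking the minimum
-- priority index, instead of A's five sequential membership scans over the category list.

-- ===== PORT A =====
def suggest_response_approach_py (examples : List (List (String × String))) : String :=
  if examples = [] then "general_assistance"
  else
    let categories := examples.map (fun ex => PySem.Dict.getD (PySem.Dict.mk ex) "category" "")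
    if categories.contains "ORDER" then "order_assistance"
    else if categories.contains "ACCOUNT" then "account_assistance"
    else if categories.contains "PAYMENT" then "payment_assistance"
    else if categories.contains "REFUND" then "refund_assistance"
    else if categories.contains "DELIVERY" then "delivery_assistance"
    else "general_customer_service"

-- ===== PORT B =====
-- priority table of B (the dict literal `prio` in Source B)
def pvPrio : PySem.Dict String Int :=
  PySem.Dict.mk [("ORDER", 0), ("ACCOUNT", 1), ("PAYMENT", 2), ("REFUND", 3), ("DELIVERY", 4)]

-- index→approach table of B (the dict literal in Source B's return)
def pvApproach : PySem.Dict Int String :=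
  PySem.Dict.mk [(0, "order_assistance"), (1, "account_assistance"), (2, "payment_assistance"),
                 (3, "refund_assistance"), (4, "delivery_assistance")]

-- the loop body of Source B: i = prio.get(ex.get("category",""), 5); if i < best: best = i
def pvStep (b : Int) (ex : List (String × String)) : Int :=
  let i := PySem.Dict.getD pvPrio (PySem.Dict.getD (PySem.Dict.mk ex) "category" "") 5
  if i < b then i else b

def suggest_response_approach_py_alt (examples : List (List (String × String))) : String :=
  if examples = [] then "general_assistance"
  else
    let best := examples.foldl pvStep 5
    PySem.Dict.getD pvApproach best "general_customer_service"

-- ===== PRECONDITION & SPEC =====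
def Spec_suggest_response_approach_py (examples : List (List (String × String))) (out : String) : Prop := out = suggest_response_approach_py_alt examples
instance (examples : List (List (String × String))) (out : String) : Decidable (Spec_suggest_response_approach_py examples out) := by unfold Spec_suggest_response_approach_py; infer_instance

-- ===== CLAIM (what is proved, stated in full; the proofs are below) =====
def Claim_equal_suggest_response_approach_py : Prop := ∀ (examples : List (List (String × String))), Dom_suggest_response_approach_py examples → Spec_suggest_response_approach_py examples (suggest_response_approach_py examples)

-- ===== LEMMAS AND PROOFS =====

-- category of one example (shared expression of both ports, named only for the proofs)
def pvCat (ex : List (String × String)) : String := PySem.Dict.getD (PySem.Dict.mk ex) "category" ""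

-- the priority index of one category, as an if-chain
lemma pvIdx_eq (c : String) : PySem.Dict.getD pvPrio c 5 =
    if c = "ORDER" then 0 else if c = "ACCOUNT" then 1 else if c = "PAYMENT" then 2
    else if c = "REFUND" then 3 else if c = "DELIVERY" then 4 else 5 := by
  by_cases h1 : c = "ORDER"
  · subst h1; decide
  by_cases h2 : c = "ACCOUNT"
  · subst h2; decide
  by_cases h3 : c = "PAYMENT"
  · subst h3; decide
  by_cases h4 : c = "REFUND"
  · subst h4; decide
  by_cases h5 : c = "DELIVERY"
  · subst h5; decide
  simp only [pvPrio, PySem.Dict.getD_eq_get?_getD, PySem.Dict.get?_mk_cons, beq_iff_eq]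
  simp [Ne.symm h1, Ne.symm h2, Ne.symm h3, Ne.symm h4, Ne.symm h5, PySem.Dict.get?, h1, h2, h3, h4, h5]

lemma pvIdx_le (c : String) : PySem.Dict.getD pvPrio c 5 ≤ 5 := by
  rw [pvIdx_eq]; split_ifs <;> norm_num

lemma pvStep_eq (b : Int) (ex : List (String × String)) :
    pvStep b ex = min b (PySem.Dict.getD pvPrio (pvCat ex) 5) := by
  simp [pvStep, pvCat]; omega

-- accumulator lemma: the running minimum factors out of the fold
lemma pvFold_acc (xs : List (List (String × String))) : ∀ (a : Int), a ≤ 5 →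
    xs.foldl pvStep a = min a (xs.foldl pvStep 5) := by
  induction xs with
  | nil => intro a ha; simp; omega
  | cons x xs ih =>
    intro a ha
    have hx := pvIdx_le (pvCat x)
    simp only [List.foldl_cons, pvStep_eq]
    rw [ih (min a (PySem.Dict.getD pvPrio (pvCat x) 5)) (by omega),
        ih (min 5 (PySem.Dict.getD pvPrio (pvCat x) 5)) (by omega)]
    omega

-- characterisation of the fold by membership of the five categories
lemma pvFold_char (xs : List (List (String × String))) :
    xs.foldl pvStep 5 =
      if (xs.map pvCat).contains "ORDER" then 0
      else if (xs.map pvCat).contains "ACCOUNT" then 1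
      else if (xs.map pvCat).contains "PAYMENT" then 2
      else if (xs.map pvCat).contains "REFUND" then 3
      else if (xs.map pvCat).contains "DELIVERY" then 4
      else 5 := by
  induction xs with
  | nil => simp
  | cons x xs ih =>
    simp only [List.foldl_cons, pvStep_eq, List.map_cons, List.contains_cons]
    rw [pvFold_acc xs (min 5 (PySem.Dict.getD pvPrio (pvCat x) 5))
          (by have := pvIdx_le (pvCat x); omega), ih, pvIdx_eq]
    by_cases h1 : pvCat x = "ORDER"
    · simp [h1, beq_iff_eq]; split_ifs <;> first | omega | tauto
    by_cases h2 : pvCat x = "ACCOUNT"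
    · simp [h1, h2, beq_iff_eq]; split_ifs <;> first | omega | tauto
    by_cases h3 : pvCat x = "PAYMENT"
    · simp [h1, h2, h3, beq_iff_eq]; split_ifs <;> first | omega | tauto
    by_cases h4 : pvCat x = "REFUND"
    · simp [h1, h2, h3, h4, beq_iff_eq]; split_ifs <;> first | omega | tauto
    by_cases h5 : pvCat x = "DELIVERY"
    · simp [h1, h2, h3, h4, h5, beq_iff_eq]; split_ifs <;> first | omega | tauto
    simp [h1, h2, h3, h4, h5, Ne.symm h1, Ne.symm h2, Ne.symm h3, Ne.symm h4, Ne.symm h5,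
          beq_iff_eq]
    split_ifs <;> omega

-- ===== VERDICT (by name: the statement is the Claim_ definition above) =====
theorem suggest_response_approach_py_spec : Claim_equal_suggest_response_approach_py := by
  intro examples _
  unfold Spec_suggest_response_approach_py suggest_response_approach_py suggest_response_approach_py_alt
  by_cases he : examples = []
  · simp [he]
  · simp only [if_neg he]
    rw [pvFold_char]
    have hmap : examples.map (fun ex => PySem.Dict.getD (PySem.Dict.mk ex) "category" "")
        = examples.map pvCat := by simp [pvCat]
    rw [hmap]
    split_ifs <;> rfl
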